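-- pv_equiv track=rewrite | github.com/nkoranda97/BCR-FastAPI-app | app/services/ddl.py | lazy_classifier
-- ===== SOURCE A (Python) =====
-- from typing import Optional, Tuple, Union
--
-- def lazy_classifier(gene: str) -> Optional[str]:
--     """
--     Classify a gene based on its prefix
--
--     Args:
--         gene: Gene name to classify
--
--     Returns:
--         Classification type or None if not recognized
--     """
--     if not gene:
--         return None
--
--     # Handle 'all' case
--     if gene.lower() == "all":
--         return "v_call_VDJ"  # Default to V gene for 'all'
--
--     # Extract the prefix (e.g., 'IGHV' from 'IGHV1-80')
--     prefix = "".join(c for c in gene if not c.isdigit() and c != "-")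
--
--     match prefix:
--         case prefix if prefix.startswith("IGHV"):
--             return "v_call_VDJ"
--         case prefix if prefix.startswith("IGHD"):
--             return "d_call_VDJ"
--         case prefix if prefix.startswith("IGHJ"):
--             return "j_call_VDJ"
--         case prefix if any(
--             prefix.startswith(x) for x in ["IGHG", "IGHA", "IGHD", "IGHE", "IGHM"]
--         ):
--             return "c_call_VDJ"
--         case prefix if prefix.startswith("IGKV") or prefix.startswith("IGLV"):
--             return "v_call_VJ"
--         case prefix if prefix.startswith("IGKJ") or prefix.startswith("IGLJ"):
--             return "j_call_VJ"
--         case prefix if prefix.startswith("IGKC") or prefix.startswith("IGLC"):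
--             return "c_call_VJ"
--         case _:
--             return None
-- ===== SOURCE B (Python) =====
-- def lazy_classifier(gene):
--     """Classify a gene by its 4-character prefix via a lookup table."""
--     if not gene:
--         return None
--     if gene.lower() == "all":
--         return "v_call_VDJ"
--     prefix = "".join(c for c in gene if not c.isdigit() and c != "-")
--     table = {
--         "IGHV": "v_call_VDJ",
--         "IGHD": "d_call_VDJ",
--         "IGHJ": "j_call_VDJ",
--         "IGHG": "c_call_VDJ",
--         "IGHA": "c_call_VDJ",
--         "IGHE": "c_call_VDJ",
--         "IGHM": "c_call_VDJ",
--         "IGKV": "v_call_VJ",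
--         "IGLV": "v_call_VJ",
--         "IGKJ": "j_call_VJ",
--         "IGLJ": "j_call_VJ",
--         "IGKC": "c_call_VJ",
--         "IGLC": "c_call_VJ",
--     }
--     return table.get(prefix[:4])
-- ===== Notes on version B (the rewrite author's own statement) =====
-- stated objective: simpler
-- what changed: Replaces the seven-arm match/startswith chain (with its list-of-patterns any-scan and dead IGHD arm) by a single dictionary keyed on the cleaned prefix's first 4 characters, valid because every pattern A tests is exactly 4 characters long.
import Mathlib
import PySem

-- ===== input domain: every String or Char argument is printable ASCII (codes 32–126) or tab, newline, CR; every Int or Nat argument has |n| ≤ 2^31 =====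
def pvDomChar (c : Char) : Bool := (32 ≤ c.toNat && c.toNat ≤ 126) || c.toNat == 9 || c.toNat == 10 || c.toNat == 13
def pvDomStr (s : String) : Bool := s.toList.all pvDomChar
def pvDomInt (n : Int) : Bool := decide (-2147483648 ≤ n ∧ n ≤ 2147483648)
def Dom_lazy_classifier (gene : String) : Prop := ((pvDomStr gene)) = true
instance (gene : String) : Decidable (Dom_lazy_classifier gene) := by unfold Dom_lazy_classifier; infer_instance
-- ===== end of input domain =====

-- B replaces A's match/startswith chain by one 4-char-key dictionary lookup (objective: simpler).

-- ===== PORT A =====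
-- 'prefix = "".join(c for c in gene if not c.isdigit() and c != "-")' — the join of the
-- kept single characters is exactly List.filter on the char list (exact port).
def lcClean (cs : List Char) : List Char :=
  cs.filter (fun c => !(PySem.Chars.isdigit c) && !(c == '-'))

def lazy_classifier (gene : String) : Option String :=
  let cs := gene.toList
  if cs = [] then none
  else if PySem.Chars.lower cs = "all".toList then some "v_call_VDJ"
  else
    let pfx := lcClean cs
    if PySem.Chars.startswith pfx "IGHV".toList then some "v_call_VDJ"
    else if PySem.Chars.startswith pfx "IGHD".toList then some "d_call_VDJ"
    else if PySem.Chars.startswith pfx "IGHJ".toList then some "j_call_VDJ"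
    else if (["IGHG", "IGHA", "IGHD", "IGHE", "IGHM"].map String.toList).any
        (fun x => PySem.Chars.startswith pfx x) then some "c_call_VDJ"
    else if PySem.Chars.startswith pfx "IGKV".toList || PySem.Chars.startswith pfx "IGLV".toList then some "v_call_VJ"
    else if PySem.Chars.startswith pfx "IGKJ".toList || PySem.Chars.startswith pfx "IGLJ".toList then some "j_call_VJ"
    else if PySem.Chars.startswith pfx "IGKC".toList || PySem.Chars.startswith pfx "IGLC".toList then some "c_call_VJ"
    else none

-- ===== PORT B =====
-- the dict literal of Source B (string keys ported as char lists, per the type convention)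
def lcTable : PySem.Dict (List Char) String :=
  (((((((((((((PySem.Dict.empty.insert "IGHV".toList "v_call_VDJ").insert
    "IGHD".toList "d_call_VDJ").insert
    "IGHJ".toList "j_call_VDJ").insert
    "IGHG".toList "c_call_VDJ").insert
    "IGHA".toList "c_call_VDJ").insert
    "IGHE".toList "c_call_VDJ").insert
    "IGHM".toList "c_call_VDJ").insert
    "IGKV".toList "v_call_VJ").insert
    "IGLV".toList "v_call_VJ").insert
    "IGKJ".toList "j_call_VJ").insert
    "IGLJ".toList "j_call_VJ").insert
    "IGKC".toList "c_call_VJ").insert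
    "IGLC".toList "c_call_VJ")

def lazy_classifier_alt (gene : String) : Option String :=
  let cs := gene.toList
  if cs = [] then none
  else if PySem.Chars.lower cs = "all".toList then some "v_call_VDJ"
  else
    let pfx := (cs.filter (fun c => !(PySem.Chars.isdigit c) && !(c == '-')))
    lcTable.get? (PySem.List.slice pfx none (some 4))

-- ===== PRECONDITION & SPEC =====
def Spec_lazy_classifier (gene : String) (out : Option String) : Prop := out = lazy_classifier_alt gene
instance (gene : String) (out : Option String) : Decidable (Spec_lazy_classifier gene out) := by unfold Spec_lazy_classifier; infer_instance

-- ===== CLAIM (what is proved, stated in full; the proofs are below) =====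
def Claim_equal_lazy_classifier : Prop := ∀ (gene : String), Dom_lazy_classifier gene → Spec_lazy_classifier gene (lazy_classifier gene)

-- ===== LEMMAS AND PROOFS =====

-- a startswith test against a 4-character pattern is an equality test on the first 4 characters
lemma sw4 (p pat : List Char) (h : pat.length = 4) :
    PySem.Chars.startswith p pat = decide (p.take 4 = pat) := by
  by_cases hp : p.take 4 = pat
  · have ht : PySem.Chars.startswith p pat = true := by
      rw [PySem.Chars.startswith_iff, ← hp]
      exact List.take_prefix _ _
    rw [ht]; simp [hp]
  · have hf : PySem.Chars.startswith p pat = false := by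
      by_contra hb
      have hb' : PySem.Chars.startswith p pat = true := by
        revert hb; cases PySem.Chars.startswith p pat <;> simp
      have he := (List.prefix_iff_eq_take.mp ((PySem.Chars.startswith_iff _ _).mp hb')).symm
      rw [h] at he
      exact hp he
    rw [hf]; simp [hp]

-- the core case analysis: A's branch chain equals B's table lookup, for any cleaned prefix
lemma core (p : List Char) :
    (if PySem.Chars.startswith p "IGHV".toList then some "v_call_VDJ"
    else if PySem.Chars.startswith p "IGHD".toList then some "d_call_VDJ"
    else if PySem.Chars.startswith p "IGHJ".toList then some "j_call_VDJ"
    else if (["IGHG", "IGHA", "IGHD", "IGHE", "IGHM"].map String.toList).any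
        (fun x => PySem.Chars.startswith p x) then some "c_call_VDJ"
    else if PySem.Chars.startswith p "IGKV".toList || PySem.Chars.startswith p "IGLV".toList then some "v_call_VJ"
    else if PySem.Chars.startswith p "IGKJ".toList || PySem.Chars.startswith p "IGLJ".toList then some "j_call_VJ"
    else if PySem.Chars.startswith p "IGKC".toList || PySem.Chars.startswith p "IGLC".toList then some "c_call_VJ"
    else none)
    = lcTable.get? (PySem.List.slice p none (some 4)) := by
  have hs : PySem.List.slice p none (some 4) = p.take 4 := by
    simp [PySem.List.slice_to]
  rw [hs]
  simp only [List.map, List.any_cons, List.any_nil]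
  simp only [sw4 p "IGHV".toList (by decide),
      sw4 p "IGHD".toList (by decide),
      sw4 p "IGHJ".toList (by decide),
      sw4 p "IGHG".toList (by decide),
      sw4 p "IGHA".toList (by decide),
      sw4 p "IGHE".toList (by decide),
      sw4 p "IGHM".toList (by decide),
      sw4 p "IGKV".toList (by decide),
      sw4 p "IGLV".toList (by decide),
      sw4 p "IGKJ".toList (by decide),
      sw4 p "IGLJ".toList (by decide),
      sw4 p "IGKC".toList (by decide),
      sw4 p "IGLC".toList (by decide)]
  generalize p.take 4 = t
  by_cases h1 : t = (['I', 'G', 'H', 'V'] : List Char)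
  · subst h1; decide
  by_cases h2 : t = (['I', 'G', 'H', 'D'] : List Char)
  · subst h2; decide
  by_cases h3 : t = (['I', 'G', 'H', 'J'] : List Char)
  · subst h3; decide
  by_cases h4 : t = (['I', 'G', 'H', 'G'] : List Char)
  · subst h4; decide
  by_cases h5 : t = (['I', 'G', 'H', 'A'] : List Char)
  · subst h5; decide
  by_cases h6 : t = (['I', 'G', 'H', 'E'] : List Char)
  · subst h6; decide
  by_cases h7 : t = (['I', 'G', 'H', 'M'] : List Char)
  · subst h7; decide
  by_cases h8 : t = (['I', 'G', 'K', 'V'] : List Char)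
  · subst h8; decide
  by_cases h9 : t = (['I', 'G', 'L', 'V'] : List Char)
  · subst h9; decide
  by_cases h10 : t = (['I', 'G', 'K', 'J'] : List Char)
  · subst h10; decide
  by_cases h11 : t = (['I', 'G', 'L', 'J'] : List Char)
  · subst h11; decide
  by_cases h12 : t = (['I', 'G', 'K', 'C'] : List Char)
  · subst h12; decide
  by_cases h13 : t = (['I', 'G', 'L', 'C'] : List Char)
  · subst h13; decide
  simp [lcTable, PySem.Dict.get?, PySem.Dict.insert, PySem.Dict.empty, h1, h2, h3, h4, h5, h6, h7, h8, h9, h10, h11, h12, h13]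
  exact ⟨fun e => h1 e.symm, fun e => h2 e.symm, fun e => h3 e.symm, fun e => h4 e.symm,
    fun e => h5 e.symm, fun e => h6 e.symm, fun e => h7 e.symm, fun e => h8 e.symm,
    fun e => h9 e.symm, fun e => h10 e.symm, fun e => h11 e.symm, fun e => h12 e.symm,
    fun e => h13 e.symm⟩

-- ===== VERDICT (by name: the statement is the Claim_ definition above) =====
theorem lazy_classifier_spec : Claim_equal_lazy_classifier := by
  intro gene _
  unfold Spec_lazy_classifier lazy_classifier lazy_classifier_alt lcClean
  by_cases h1 : gene.toList = []
  · simp [h1]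
  by_cases h2 : PySem.Chars.lower gene.toList = "all".toList
  · simp [h1, h2]
  simp only [if_neg h1, if_neg h2]
  exact core _
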